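-- pv_equiv track=rewrite | github.com/andreafailla/305LL_Linguistica_Computazionale_I | programma1.py | CdF_500
-- ===== SOURCE A (Python) =====
-- def CdF_500(tokensTOT):
--     #contengono i vocaboli appartenenti a una specifica classe di frequenza
--     V1_class = []
--     V5_class = []
--     V10_class = []
--     #contengono la lunghezza delle liste di cui sopra, misurata ogni 500 token.
--     #var sta per variazione
--     V1_var = []
--     V5_var = []
--     V10_var = []
--
--     numToken = len(tokensTOT)
--     vocabolario = list(set(tokensTOT))
--
--     #itera partendo da 500 e fino alla lunghezza del corpus con incrementi di 500
--     for r in range(500, numToken, 500):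
--         for v in vocabolario:
--             #calcola la frequenza assoluta del token fino al valore dell'iterazione
--             freqToken = tokensTOT[:r].count(v)
--             #se la frequenza è 1, 5 o 10, inserisce il token in una lista apposita...
--             if (freqToken == 1):
--                 V1_class.append(v)
--             elif(freqToken == 5):
--                 V5_class.append(v)
--             elif(freqToken == 10):
--                 V10_class.append(v)
--         #...e poi inserisce in un'altra lista il numero di parole con
--         #quella frequenza fino a quell'iterazione.
--         V1_var.append(len(V1_class))
--         V1_class = []
--         V5_var.append(len(V5_class))
--         V5_class = []
--         V10_var.append(len(V10_class))
--         V10_class = []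
--
--     return V1_var, V5_var, V10_var
-- ===== SOURCE B (Python) =====
-- def CdF_500(tokensTOT):
--     V1_var = []
--     V5_var = []
--     V10_var = []
--     n = len(tokensTOT)
--     freq = {}
--     c1 = c5 = c10 = 0
--     for i, tok in enumerate(tokensTOT):
--         f = freq.get(tok, 0) + 1
--         freq[tok] = f
--         if f == 1:
--             c1 += 1
--         elif f == 2:
--             c1 -= 1
--         elif f == 5:
--             c5 += 1
--         elif f == 6:
--             c5 -= 1
--         elif f == 10:
--             c10 += 1
--         elif f == 11:
--             c10 -= 1
--         r = i + 1
--         if r % 500 == 0 and r < n: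
--             V1_var.append(c1)
--             V5_var.append(c5)
--             V10_var.append(c10)
--     return V1_var, V5_var, V10_var
-- ===== Notes on version B (the rewrite author's own statement) =====
-- stated objective: faster
-- what changed: Replaced the per-checkpoint rescan (for every 500-token prefix, counting each vocabulary word's occurrences in the prefix from scratch) by a single left-to-right pass that keeps an incremental frequency dict and three running counters of words at frequency 1/5/10, read off at each checkpoint.
import Mathlib
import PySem

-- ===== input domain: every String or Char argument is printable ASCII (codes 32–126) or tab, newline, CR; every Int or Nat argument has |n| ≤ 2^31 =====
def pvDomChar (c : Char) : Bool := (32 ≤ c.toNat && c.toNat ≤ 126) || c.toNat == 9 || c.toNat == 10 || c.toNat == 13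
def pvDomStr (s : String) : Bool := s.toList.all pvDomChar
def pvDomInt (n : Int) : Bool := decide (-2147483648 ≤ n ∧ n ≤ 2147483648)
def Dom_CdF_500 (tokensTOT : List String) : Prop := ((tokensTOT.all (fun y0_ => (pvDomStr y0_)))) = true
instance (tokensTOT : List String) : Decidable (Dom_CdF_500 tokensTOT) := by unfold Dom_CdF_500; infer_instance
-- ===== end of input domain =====

-- B replaces A's per-checkpoint rescan of the whole vocabulary by one pass with an
-- incremental frequency dict and three running counters (objective: faster).

-- ===== PORT A =====
def CdF_500 (tokensTOT : List String) : List Int × List Int × List Int :=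
  let numToken : Int := tokensTOT.length
  let vocabolario : List String := PySem.Set.ofList tokensTOT
  (PySem.List.pyRange 500 numToken 500).foldl
    (fun (acc : List Int × List Int × List Int) (r : Int) =>
      let cls := vocabolario.foldl
        (fun (cls : List String × List String × List String) (v : String) =>
          let freqToken := (PySem.List.slice tokensTOT none (some r)).count v
          if freqToken = 1 then (cls.1 ++ [v], cls.2.1, cls.2.2)
          else if freqToken = 5 then (cls.1, cls.2.1 ++ [v], cls.2.2)
          else if freqToken = 10 then (cls.1, cls.2.1, cls.2.2 ++ [v])
          else cls)
        ([], [], [])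
      (acc.1 ++ [(cls.1.length : Int)], acc.2.1 ++ [(cls.2.1.length : Int)],
       acc.2.2 ++ [(cls.2.2.length : Int)]))
    ([], [], [])

-- ===== PORT B =====
def CdF_500_alt (tokensTOT : List String) : List Int × List Int × List Int :=
  let n : Int := tokensTOT.length
  ((PySem.List.enumerate tokensTOT).foldl
    (fun (st : PySem.Dict String Int × Int × Int × Int × (List Int × List Int × List Int))
         (p : Int × String) =>
      let f := st.1.getD p.2 0 + 1
      let freq' := st.1.insert p.2 f
      let cs : Int × Int × Int :=
        if f = 1 then (st.2.1 + 1, st.2.2.1, st.2.2.2.1)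
        else if f = 2 then (st.2.1 - 1, st.2.2.1, st.2.2.2.1)
        else if f = 5 then (st.2.1, st.2.2.1 + 1, st.2.2.2.1)
        else if f = 6 then (st.2.1, st.2.2.1 - 1, st.2.2.2.1)
        else if f = 10 then (st.2.1, st.2.2.1, st.2.2.2.1 + 1)
        else if f = 11 then (st.2.1, st.2.2.1, st.2.2.2.1 - 1)
        else (st.2.1, st.2.2.1, st.2.2.2.1)
      let r := p.1 + 1
      let outs :=
        if PySem.Int.mod r 500 = 0 ∧ r < n then
          (st.2.2.2.2.1 ++ [cs.1], st.2.2.2.2.2.1 ++ [cs.2.1], st.2.2.2.2.2.2 ++ [cs.2.2])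
        else st.2.2.2.2
      (freq', cs.1, cs.2.1, cs.2.2, outs))
    (PySem.Dict.empty, 0, 0, 0, ([], [], []))).2.2.2.2

-- ===== PRECONDITION & SPEC =====
def Spec_CdF_500 (tokensTOT : List String) (out : List Int × List Int × List Int) : Prop := out = CdF_500_alt tokensTOT
instance (tokensTOT : List String) (out : List Int × List Int × List Int) : Decidable (Spec_CdF_500 tokensTOT out) := by unfold Spec_CdF_500; infer_instance

-- ===== CLAIM (what is proved, stated in full; the proofs are below) =====
def Claim_equal_CdF_500 : Prop := ∀ (tokensTOT : List String), Dom_CdF_500 tokensTOT → Spec_CdF_500 tokensTOT (CdF_500 tokensTOT)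

-- ===== LEMMAS AND PROOFS =====

-- number of distinct words of frequency k in p, as an integer
def NInt (k : Nat) (p : List String) : Int :=
  (p.dedup.countP (fun v => p.count v == k) : Int)

-- checkpoint list: multiples of 500 that are ≤ m and < n
def cpsL (n : Nat) : Nat → List Nat
  | 0 => []
  | m+1 => cpsL n m ++ (if (m+1) % 500 = 0 ∧ m+1 < n then [m+1] else [])

-- B's step function (identical to the lambda inside CdF_500_alt; used only by the proofs)
def Bstep (n : Int)
    (st : PySem.Dict String Int × Int × Int × Int × (List Int × List Int × List Int))
    (p : Int × String) :
    PySem.Dict String Int × Int × Int × Int × (List Int × List Int × List Int) :=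
  let f := st.1.getD p.2 0 + 1
  let freq' := st.1.insert p.2 f
  let cs : Int × Int × Int :=
    if f = 1 then (st.2.1 + 1, st.2.2.1, st.2.2.2.1)
    else if f = 2 then (st.2.1 - 1, st.2.2.1, st.2.2.2.1)
    else if f = 5 then (st.2.1, st.2.2.1 + 1, st.2.2.2.1)
    else if f = 6 then (st.2.1, st.2.2.1 - 1, st.2.2.2.1)
    else if f = 10 then (st.2.1, st.2.2.1, st.2.2.2.1 + 1)
    else if f = 11 then (st.2.1, st.2.2.1, st.2.2.2.1 - 1)
    else (st.2.1, st.2.2.1, st.2.2.2.1)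
  let r := p.1 + 1
  let outs :=
    if PySem.Int.mod r 500 = 0 ∧ r < n then
      (st.2.2.2.2.1 ++ [cs.1], st.2.2.2.2.2.1 ++ [cs.2.1], st.2.2.2.2.2.2 ++ [cs.2.2])
    else st.2.2.2.2
  (freq', cs.1, cs.2.1, cs.2.2, outs)

theorem alt_eq_Bstep (tokensTOT : List String) :
    CdF_500_alt tokensTOT
      = ((PySem.List.enumerate tokensTOT).foldl (Bstep (tokensTOT.length : Int))
          (PySem.Dict.empty, 0, 0, 0, ([], [], []))).2.2.2.2 := rfl

theorem foldl_triple_map {α : Type} (g1 g2 g3 : α → Int) (l : List α)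
    (a b c : List Int) :
    l.foldl (fun acc x => (acc.1 ++ [g1 x], acc.2.1 ++ [g2 x], acc.2.2 ++ [g3 x])) (a, b, c)
      = (a ++ l.map g1, b ++ l.map g2, c ++ l.map g3) := by
  induction l generalizing a b c with
  | nil => simp
  | cons x t ih => simp [List.foldl_cons, ih]

theorem inner_len (q : List String) (V : List String)
    (acc : List String × List String × List String) :
    V.foldl
      (fun (cls : List String × List String × List String) (v : String) =>
        if q.count v = 1 then (cls.1 ++ [v], cls.2.1, cls.2.2)
        else if q.count v = 5 then (cls.1, cls.2.1 ++ [v], cls.2.2)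
        else if q.count v = 10 then (cls.1, cls.2.1, cls.2.2 ++ [v])
        else cls) acc
    = (acc.1 ++ V.filter (fun v => q.count v == 1),
       acc.2.1 ++ V.filter (fun v => q.count v == 5),
       acc.2.2 ++ V.filter (fun v => q.count v == 10)) := by
  induction V generalizing acc with
  | nil => simp
  | cons x t ih =>
      simp only [List.foldl_cons, List.filter_cons]
      by_cases h1 : q.count x = 1
      · simp [h1, ih]
      · by_cases h5 : q.count x = 5
        · simp [h5, ih]
        · by_cases h10 : q.count x = 10
          · simp [h10, ih]
          · simp [h1, h5, h10, ih]

theorem countP_eq_card (V p : List String) (k : Nat) (hV : V.Nodup)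
    (hsub : ∀ v ∈ p, v ∈ V) (hk : 1 ≤ k) :
    V.countP (fun v => p.count v == k)
      = (p.toFinset.filter (fun v => p.count v = k)).card := by
  rw [List.countP_eq_length_filter]
  rw [← List.toFinset_card_of_nodup (hV.filter _)]
  rw [List.toFinset_filter]
  congr 1
  ext v
  simp only [Finset.mem_filter, List.mem_toFinset, beq_iff_eq]
  constructor
  · rintro ⟨hv, hc⟩
    exact ⟨List.count_pos_iff.mp (by omega), hc⟩
  · rintro ⟨hv, hc⟩
    exact ⟨hsub v hv, hc⟩

theorem NInt_eq_card (p : List String) (k : Nat) (hk : 1 ≤ k) :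
    NInt k p = ((p.toFinset.filter (fun v => p.count v = k)).card : Int) := by
  unfold NInt
  rw [countP_eq_card p.dedup p k p.nodup_dedup (fun v hv => List.mem_dedup.mpr hv) hk]

theorem NInt_step (p : List String) (t : String) (k : Nat) (hk : 1 ≤ k) :
    NInt k (p ++ [t]) = NInt k p
      + (if p.count t + 1 = k then (1 : Int) else 0)
      - (if p.count t = k then (1 : Int) else 0) := by
  rw [NInt_eq_card _ _ hk, NInt_eq_card _ _ hk]
  have htF : t ∈ p.toFinset.filter (fun v => p.count v = k) ↔ p.count t = k := by
    simp only [Finset.mem_filter, List.mem_toFinset]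
    exact ⟨fun h => h.2, fun h => ⟨List.count_pos_iff.mp (by omega), h⟩⟩
  have hset : (p ++ [t]).toFinset.filter (fun v => (p ++ [t]).count v = k)
      = if p.count t + 1 = k
        then insert t ((p.toFinset.filter (fun v => p.count v = k)).erase t)
        else (p.toFinset.filter (fun v => p.count v = k)).erase t := by
    split_ifs with hc <;> ext v <;>
      simp only [Finset.mem_insert, Finset.mem_erase, Finset.mem_filter, List.mem_toFinset,
        List.count_append, List.mem_append, List.count_cons, List.count_nil, beq_iff_eq,
        List.mem_cons, List.not_mem_nil, or_false] <;>
      by_cases hv : v = t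
    · subst hv; simp [hc]
    · simp only [hv, or_false, ne_eq, not_false_iff, true_and,
        if_neg (fun h : t = v => hv h.symm), zero_add]
      tauto
    · subst hv; simp; omega
    · simp only [hv, or_false, ne_eq, not_false_iff, true_and,
        if_neg (fun h : t = v => hv h.symm), zero_add]
      tauto
  rw [hset]
  by_cases hc1 : p.count t + 1 = k
  · have hnot : p.count t ≠ k := by omega
    rw [if_pos hc1, if_pos hc1, if_neg hnot,
      Finset.card_insert_of_notMem (by simp), Finset.erase_eq_of_notMem (by
        intro h; exact hnot (htF.mp h))]
    push_cast; ring
  · rw [if_neg hc1, if_neg hc1]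
    by_cases hc2 : p.count t = k
    · have htm : t ∈ p.toFinset.filter (fun v => p.count v = k) := htF.mpr hc2
      rw [if_pos hc2, Finset.card_erase_of_mem htm,
        Nat.cast_sub (Finset.one_le_card.mpr ⟨t, htm⟩)]
      push_cast; ring
    · rw [if_neg hc2, Finset.erase_eq_of_notMem (fun h => hc2 (htF.mp h))]
      ring

theorem cs_eq (p : List String) (t : String) :
    (if (p.count t : Int) + 1 = 1 then (NInt 1 p + 1, NInt 5 p, NInt 10 p)
     else if (p.count t : Int) + 1 = 2 then (NInt 1 p - 1, NInt 5 p, NInt 10 p)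
     else if (p.count t : Int) + 1 = 5 then (NInt 1 p, NInt 5 p + 1, NInt 10 p)
     else if (p.count t : Int) + 1 = 6 then (NInt 1 p, NInt 5 p - 1, NInt 10 p)
     else if (p.count t : Int) + 1 = 10 then (NInt 1 p, NInt 5 p, NInt 10 p + 1)
     else if (p.count t : Int) + 1 = 11 then (NInt 1 p, NInt 5 p, NInt 10 p - 1)
     else (NInt 1 p, NInt 5 p, NInt 10 p))
    = (NInt 1 (p ++ [t]), NInt 5 (p ++ [t]), NInt 10 (p ++ [t])) := by
  rw [NInt_step p t 1 (by norm_num), NInt_step p t 5 (by norm_num),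
    NInt_step p t 10 (by norm_num)]
  split_ifs <;> simp [Prod.mk.injEq] <;> omega

theorem enumerate_append_singleton {α : Type} (xs : List α) (y : α) (s : Int) :
    PySem.List.enumerate (xs ++ [y]) s
      = PySem.List.enumerate xs s ++ [((s + xs.length : Int), y)] := by
  induction xs generalizing s with
  | nil => simp [PySem.List.enumerate]
  | cons x t ih =>
      simp [PySem.List.enumerate, ih]
      ring

theorem pyRange500_succ (b : Int) :
    PySem.List.pyRange 500 (b + 1) 500
      = PySem.List.pyRange 500 b 500 ++ (if 500 ≤ b ∧ (500 : Int) ∣ b then [b] else []) := by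
  rw [PySem.List.pyRange_of_pos _ _ (by norm_num : (0:Int) < 500),
      PySem.List.pyRange_of_pos _ _ (by norm_num : (0:Int) < 500)]
  by_cases h : 500 ≤ b ∧ (500 : Int) ∣ b
  · obtain ⟨hle, hdvd⟩ := h
    obtain ⟨q, hq⟩ := hdvd
    have hq1 : 1 ≤ q := by omega
    have hc2 : (if (500:Int) < b + 1 then ((b + 1 - 500 + 500 - 1) / 500).toNat else 0)
        = (q - 1).toNat + 1 := by
      rw [if_pos (by omega)]
      omega
    have hc1 : (if (500:Int) < b then ((b - 500 + 500 - 1) / 500).toNat else 0)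
        = (q - 1).toNat := by
      by_cases hb : (500:Int) < b
      · rw [if_pos hb]; omega
      · rw [if_neg hb]; omega
    rw [hc1, hc2, List.range_succ, List.map_append,
      if_pos (⟨hle, ⟨q, hq⟩⟩ : 500 ≤ b ∧ (500:Int) ∣ b)]
    congr 1
    simp only [List.map_cons, List.map_nil]
    congr 1
    omega
  · rw [if_neg h]
    have : (if (500:Int) < b + 1 then ((b + 1 - 500 + 500 - 1) / 500).toNat else 0)
        = (if (500:Int) < b then ((b - 500 + 500 - 1) / 500).toNat else 0) := by
      rcases Int.lt_or_le b 500 with hb | hb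
      · rw [if_neg (by omega), if_neg (by omega)]
      · have hnd : ¬ (500:Int) ∣ b := fun hd => h ⟨hb, hd⟩
        have h5 : ¬ (b % 500 = 0) := fun h0 => hnd (Int.dvd_of_emod_eq_zero h0)
        by_cases hb' : (500:Int) < b
        · rw [if_pos (by omega), if_pos hb']; omega
        · rw [if_pos (by omega), if_neg hb']; omega
    rw [this, List.append_nil]

theorem cpsL_cast (n m : Nat) :
    (cpsL n m).map (Nat.cast : Nat → Int)
      = PySem.List.pyRange 500 ((min n (m + 1) : Nat) : Int) 500 := by
  induction m with
  | zero =>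
      rw [PySem.List.pyRange_of_pos _ _ (by norm_num : (0:Int) < 500)]
      rw [if_neg (by omega : ¬ (500:Int) < ((min n 1 : Nat) : Int))]
      simp [cpsL]
  | succ m ih =>
      simp only [cpsL, List.map_append]
      rw [ih]
      by_cases hlt : m + 1 < n
      · have hmin2 : (min n (m + 1 + 1) : Nat) = m + 2 := by omega
        have hmin1 : (min n (m + 1) : Nat) = m + 1 := by omega
        rw [hmin2, hmin1]
        rw [(by push_cast; ring : ((m + 2 : Nat) : Int) = ((m + 1 : Nat) : Int) + 1),
          pyRange500_succ]
        congr 1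
        by_cases hd : (m + 1) % 500 = 0
        · rw [if_pos ⟨hd, hlt⟩,
            if_pos (by omega : 500 ≤ ((m+1:Nat):Int) ∧ (500:Int) ∣ ((m+1:Nat):Int))]
          simp
        · rw [if_neg (by tauto),
            if_neg (by omega : ¬ (500 ≤ ((m+1:Nat):Int) ∧ (500:Int) ∣ ((m+1:Nat):Int)))]
          simp
      · have hmin2 : (min n (m + 1 + 1) : Nat) = min n (m + 1) := by omega
        rw [hmin2, if_neg (by tauto), List.map_nil, List.append_nil]

theorem B_inv (ts : List String) (m : Nat) (hm : m ≤ ts.length) :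
    (∀ v, ((PySem.List.enumerate (ts.take m)).foldl (Bstep (ts.length : Int))
          (PySem.Dict.empty, 0, 0, 0, ([], [], []))).1.getD v 0
        = ((ts.take m).count v : Int))
    ∧ ((PySem.List.enumerate (ts.take m)).foldl (Bstep (ts.length : Int))
          (PySem.Dict.empty, 0, 0, 0, ([], [], []))).2.1 = NInt 1 (ts.take m)
    ∧ ((PySem.List.enumerate (ts.take m)).foldl (Bstep (ts.length : Int))
          (PySem.Dict.empty, 0, 0, 0, ([], [], []))).2.2.1 = NInt 5 (ts.take m)
    ∧ ((PySem.List.enumerate (ts.take m)).foldl (Bstep (ts.length : Int))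
          (PySem.Dict.empty, 0, 0, 0, ([], [], []))).2.2.2.1 = NInt 10 (ts.take m)
    ∧ ((PySem.List.enumerate (ts.take m)).foldl (Bstep (ts.length : Int))
          (PySem.Dict.empty, 0, 0, 0, ([], [], []))).2.2.2.2
        = ((cpsL ts.length m).map (fun r => NInt 1 (ts.take r)),
           (cpsL ts.length m).map (fun r => NInt 5 (ts.take r)),
           (cpsL ts.length m).map (fun r => NInt 10 (ts.take r))) := by
  induction m with
  | zero =>
      simp [cpsL, NInt, PySem.Dict.getD, PySem.Dict.get?_empty]
  | succ m ih =>
      have hm' : m ≤ ts.length := by omega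
      have hlt : m < ts.length := by omega
      obtain ⟨IH1, IH2, IH3, IH4, IH5⟩ := ih hm'
      have hq : ts.take (m + 1) = ts.take m ++ [ts[m]] := by
        rw [List.take_add_one]
        simp [List.getElem?_eq_getElem hlt]
      rw [hq, enumerate_append_singleton, List.foldl_concat]
      have hidx : ((0 : Int) + ((ts.take m).length : Int)) = (m : Int) := by
        simp [List.length_take]
        omega
      rw [hidx]
      set res := (PySem.List.enumerate (ts.take m)).foldl (Bstep (ts.length : Int))
          (PySem.Dict.empty, 0, 0, 0, ([], [], [])) with hres
      simp only [Bstep]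
      rw [IH1 ts[m], IH2, IH3, IH4, IH5]
      rw [cs_eq (ts.take m) ts[m]]
      have hcond : (PySem.Int.mod ((m : Int) + 1) 500 = 0 ∧ (m : Int) + 1 < (ts.length : Int))
          ↔ ((m + 1) % 500 = 0 ∧ m + 1 < ts.length) := by
        rw [PySem.Int.mod_eq_emod_of_pos (by norm_num : (0:Int) < 500)]
        omega
      refine ⟨?_, ?_, ?_, ?_, ?_⟩
      · intro v
        rw [PySem.Dict.getD_insert]
        by_cases hv : v = ts[m]
        · subst hv
          rw [if_pos rfl, List.count_append]
          have h1 : List.count ts[m] [ts[m]] = 1 := by simp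
          rw [h1]
          push_cast
          ring
        · rw [if_neg hv, IH1 v, List.count_append]
          have h0 : List.count v [ts[m]] = 0 := by
            simp only [List.count_cons, List.count_nil, beq_iff_eq, zero_add,
              if_neg (fun h : ts[m] = v => hv h.symm)]
          rw [h0, Nat.add_zero]
      · simp
      · simp
      · simp
      · simp only [hcond, cpsL, List.map_append]
        by_cases hc : (m + 1) % 500 = 0 ∧ m + 1 < ts.length
        · repeat rw [if_pos hc]
          simp only [List.map_cons, List.map_nil, hq]
        · repeat rw [if_neg hc]
          simp

theorem map_value_eq (ts : List String) (k : Nat) (hk : 1 ≤ k) (r : Nat) :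
    ((PySem.Set.ofList ts).countP
        (fun v => (PySem.List.slice ts none (some (r : Int))).count v == k) : Int)
      = NInt k (ts.take r) := by
  rw [PySem.List.slice_to ts (Int.natCast_nonneg r)]
  rw [(by simp : ((r : Int)).toNat = r)]
  rw [countP_eq_card (PySem.Set.ofList ts) (ts.take r) k (PySem.Set.nodup_ofList ts)
    (fun v hv => (PySem.Set.mem_ofList ts v).mpr (List.mem_of_mem_take hv)) hk]
  rw [NInt_eq_card _ _ hk]

theorem CdF_500_spec' : ∀ (tokensTOT : List String),
    CdF_500 tokensTOT = CdF_500_alt tokensTOT := by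
  intro ts
  have hB := B_inv ts ts.length le_rfl
  rw [List.take_length] at hB
  rw [alt_eq_Bstep, hB.2.2.2.2]
  simp only [CdF_500, inner_len, List.nil_append, foldl_triple_map,
    ← List.countP_eq_length_filter]
  have hpr : PySem.List.pyRange 500 ((ts.length : Nat) : Int) 500
      = (cpsL ts.length ts.length).map (Nat.cast : Nat → Int) := by
    rw [cpsL_cast]
    congr 2
    omega
  rw [hpr]
  simp only [List.map_map, Prod.mk.injEq]
  refine ⟨?_, ?_, ?_⟩ <;>
    refine List.map_congr_left ?_ <;>
    intro r hr <;>
    simp only [Function.comp_apply] <;>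
    exact map_value_eq ts _ (by norm_num) r

-- ===== VERDICT (by name: the statement is the Claim_ definition above) =====
theorem CdF_500_spec : Claim_equal_CdF_500 := by
  intro tokensTOT _
  unfold Spec_CdF_500
  exact CdF_500_spec' tokensTOT
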